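-- pv_equiv track=rewrite | github.com/DataXpertEngineer/dsa-using-python | stacks/applications/parentheses_checker.py | is_balanced_multiple
-- ===== SOURCE A (Python) =====
-- def is_balanced_multiple(s: str) -> bool:
--     """
--     Check balanced parentheses for multiple types: (), [], {}, <>
--
--     Args:
--         s (str): String containing parentheses
--
--     Returns:
--         bool: True if balanced, False otherwise
--
--     Complexity:
--         Time: O(n)     - Single pass through string.
--         Space: O(n)   - Stack storage.
--     """
--     stack = []
--     opening = set('([{<')
--     closing = set(')]}>')
--     pairs = {'(': ')', '[': ']', '{': '}', '<': '>'}
--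
--     for char in s:
--         if char in opening:
--             stack.append(char)
--         elif char in closing:
--             if not stack:
--                 return False
--             top = stack.pop()
--             if pairs.get(top) != char:
--                 return False
--
--     return len(stack) == 0
-- ===== SOURCE B (Python) =====
-- def is_balanced_multiple(s: str) -> bool:
--     """Adjacent-pair elimination: keep only bracket characters, then
--     repeatedly sweep the list removing adjacent matched pairs until a
--     sweep removes nothing; balanced iff nothing is left."""
--     t = [c for c in s if c in '()[]{}<>']
--     while True:
--         t2 = _sweep(t)
--         if len(t2) == len(t):
--             break
--         t = t2
--     return not t
--
--
-- def _sweep(t):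
--     out = []
--     i = 0
--     while i < len(t):
--         if i + 1 < len(t) and t[i] + t[i + 1] in ('()', '[]', '{}', '<>'):
--             i += 2
--         else:
--             out.append(t[i])
--             i += 1
--     return out
-- ===== Notes on version B (the rewrite author's own statement) =====
-- stated objective: alternative
-- what changed: Replaces A's single-pass explicit stack with filtering to bracket characters followed by repeated left-to-right sweeps that delete adjacent matched pairs until no sweep removes anything; balanced iff nothing remains.
import Mathlib
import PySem

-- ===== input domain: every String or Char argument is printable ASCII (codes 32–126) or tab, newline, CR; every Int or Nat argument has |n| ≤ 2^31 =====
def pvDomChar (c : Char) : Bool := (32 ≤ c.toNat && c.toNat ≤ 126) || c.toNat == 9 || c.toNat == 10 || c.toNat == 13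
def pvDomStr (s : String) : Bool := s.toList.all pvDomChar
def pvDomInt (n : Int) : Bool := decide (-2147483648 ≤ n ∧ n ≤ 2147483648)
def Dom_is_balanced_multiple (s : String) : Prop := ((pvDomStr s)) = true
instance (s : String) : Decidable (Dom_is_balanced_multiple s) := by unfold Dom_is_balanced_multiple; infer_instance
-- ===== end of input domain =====

-- B replaces A's single-pass explicit stack by repeated adjacent-matched-pair
-- elimination sweeps over the bracket characters (objective: alternative, not faster).

-- ===== PORT A =====
def pvOpening : PySem.Set Char := PySem.Set.ofList "([{<".toList
def pvClosing : PySem.Set Char := PySem.Set.ofList ")]}>".toList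
def pvPairs : PySem.Dict Char Char :=
  ((((PySem.Dict.empty).insert '(' ')').insert '[' ']').insert '{' '}').insert '<' '>'

-- the for-loop of A: state = stack (head = top); early returns become `false`
def pvALoop : List Char → List Char → Bool
  | [], stack => stack.length == 0
  | c :: rest, stack =>
    if pvOpening.contains c then pvALoop rest (c :: stack)
    else if pvClosing.contains c then
      match stack with
      | [] => false
      | top :: st => if pvPairs.get? top ≠ some c then false else pvALoop rest st
    else pvALoop rest stack

def is_balanced_multiple (s : String) : Bool := pvALoop s.toList []

-- ===== PORT B =====
-- `c in '()[]{}<>'` on a single char = char membership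
def pvIsBracket (c : Char) : Bool := "()[]{}<>".toList.contains c
def pvMatch (a b : Char) : Bool :=
  (a == '(' && b == ')') || (a == '[' && b == ']') || (a == '{' && b == '}') || (a == '<' && b == '>')

-- _sweep: one left-to-right pass dropping adjacent matched pairs
def pvSweep : List Char → List Char
  | [] => []
  | [a] => [a]
  | a :: b :: rest => if pvMatch a b then pvSweep rest else a :: pvSweep (b :: rest)
termination_by t => t.length

theorem pvSweep_length_le (t : List Char) : (pvSweep t).length ≤ t.length := by
  induction t using pvSweep.induct with
  | case1 => simp [pvSweep]
  | case2 a => simp [pvSweep]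
  | case3 a b rest h ih => simp only [pvSweep, if_pos h]; simp at ih ⊢; omega
  | case4 a b rest h ih => simp only [pvSweep, if_neg h]; simp at ih ⊢; omega

-- the while-True loop of B
def pvReduce (t : List Char) : List Char :=
  let t2 := pvSweep t
  if t2.length == t.length then t else pvReduce t2
termination_by t.length
decreasing_by
  have h1 := pvSweep_length_le t
  simp only [t2, beq_iff_eq] at *
  omega

def is_balanced_multiple_alt (s : String) : Bool :=
  (pvReduce (s.toList.filter pvIsBracket)).isEmpty

-- ===== PRECONDITION & SPEC =====
def Spec_is_balanced_multiple (s : String) (out : Bool) : Prop := out = is_balanced_multiple_alt s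
instance (s : String) (out : Bool) : Decidable (Spec_is_balanced_multiple s out) := by unfold Spec_is_balanced_multiple; infer_instance

-- ===== CLAIM (what is proved, stated in full; the proofs are below) =====
def Claim_equal_is_balanced_multiple : Prop := ∀ (s : String), Dom_is_balanced_multiple s → Spec_is_balanced_multiple s (is_balanced_multiple s)

-- ===== LEMMAS AND PROOFS =====

theorem pvOpening_cases (c : Char) :
    pvOpening.contains c = true ↔ c = '(' ∨ c = '[' ∨ c = '{' ∨ c = '<' := by
  simp [pvOpening, PySem.Set.contains, PySem.Set.ofList]

theorem pvClosing_cases (c : Char) :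
    pvClosing.contains c = true ↔ c = ')' ∨ c = ']' ∨ c = '}' ∨ c = '>' := by
  simp [pvClosing, PySem.Set.contains, PySem.Set.ofList]

theorem pvIsBracket_eq (c : Char) :
    pvIsBracket c = (pvOpening.contains c || pvClosing.contains c) := by
  have hL : "()[]{}<>".toList = ['(', ')', '[', ']', '{', '}', '<', '>'] := rfl
  rw [Bool.eq_iff_iff]
  simp only [pvIsBracket, hL, Bool.or_eq_true, pvOpening_cases, pvClosing_cases,
    List.contains_eq_mem, decide_eq_true_eq, List.mem_cons, List.not_mem_nil, or_false]
  tauto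

theorem pvMatch_cases {a b : Char} (h : pvMatch a b = true) :
    (a = '(' ∧ b = ')') ∨ (a = '[' ∧ b = ']') ∨ (a = '{' ∧ b = '}') ∨ (a = '<' ∧ b = '>') := by
  simp [pvMatch] at h
  tauto

theorem pvPairs_match {top c : Char} (ho : pvOpening.contains top = true)
    (hg : pvPairs.get? top = some c) : pvMatch top c = true := by
  rcases (pvOpening_cases top).mp ho with rfl | rfl | rfl | rfl
  · rw [show pvPairs.get? '(' = some ')' from by decide] at hg
    obtain rfl := Option.some_inj.mp hg; decide
  · rw [show pvPairs.get? '[' = some ']' from by decide] at hg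
    obtain rfl := Option.some_inj.mp hg; decide
  · rw [show pvPairs.get? '{' = some '}' from by decide] at hg
    obtain rfl := Option.some_inj.mp hg; decide
  · rw [show pvPairs.get? '<' = some '>' from by decide] at hg
    obtain rfl := Option.some_inj.mp hg; decide

-- one unfolding step of A's loop on a cons cell
theorem pvALoop_cons (c : Char) (rest st : List Char) :
    pvALoop (c :: rest) st =
      (if pvOpening.contains c then pvALoop rest (c :: st)
       else if pvClosing.contains c then
         match st with
         | [] => false
         | top :: st' => if pvPairs.get? top ≠ some c then false else pvALoop rest st'
       else pvALoop rest st) := rfl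

-- a step on the same head char preserves pointwise equality of the loop
theorem pvALoop_congr {l l' : List Char} (c : Char)
    (h : ∀ st, pvALoop l st = pvALoop l' st) :
    ∀ st, pvALoop (c :: l) st = pvALoop (c :: l') st := by
  intro st
  rw [pvALoop_cons, pvALoop_cons]
  split_ifs with h1 h2
  · exact h _
  · cases st with
    | nil => rfl
    | cons top st' =>
      change (if pvPairs.get? top ≠ some c then false else pvALoop l st') =
        (if pvPairs.get? top ≠ some c then false else pvALoop l' st')
      by_cases h3 : pvPairs.get? top = some c
      · rw [if_neg (fun hne => hne h3), if_neg (fun hne => hne h3)]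
        exact h _
      · rw [if_pos h3, if_pos h3]
  · exact h _

-- a non-bracket head char is skipped by A's loop
theorem pvALoop_skip {c : Char} (hb : pvIsBracket c = false) (l st : List Char) :
    pvALoop (c :: l) st = pvALoop l st := by
  have h2 : (pvOpening.contains c || pvClosing.contains c) = false := by
    rw [← pvIsBracket_eq]; exact hb
  rcases Bool.or_eq_false_iff.mp h2 with ⟨ho, hc⟩
  rw [pvALoop_cons, if_neg (by simp only [ho]; exact Bool.false_ne_true),
    if_neg (by simp only [hc]; exact Bool.false_ne_true)]

theorem pvALoop_filter (l : List Char) : ∀ st, pvALoop (l.filter pvIsBracket) st = pvALoop l st := by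
  induction l with
  | nil => intro st; rfl
  | cons c rest ih =>
    by_cases hb : pvIsBracket c = true
    · rw [List.filter_cons_of_pos hb]
      exact pvALoop_congr c ih
    · intro st
      rw [List.filter_cons_of_neg hb, pvALoop_skip (Bool.eq_false_iff.mpr hb)]
      exact ih st

-- an adjacent matched pair is consumed by A's loop without changing the stack
theorem pvStepPair (a b : Char) (rest st : List Char) (h : pvMatch a b = true) :
    pvALoop (a :: b :: rest) st = pvALoop rest st := by
  rcases pvMatch_cases h with ⟨rfl, rfl⟩ | ⟨rfl, rfl⟩ | ⟨rfl, rfl⟩ | ⟨rfl, rfl⟩ <;> rfl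

theorem pvALoop_sweep (l : List Char) : ∀ st, pvALoop (pvSweep l) st = pvALoop l st := by
  induction l using pvSweep.induct with
  | case1 => intro st; simp [pvSweep]
  | case2 a => intro st; simp [pvSweep]
  | case3 a b rest h ih =>
    intro st
    rw [show pvSweep (a :: b :: rest) = pvSweep rest from by simp [pvSweep, h]]
    rw [ih st, pvStepPair a b rest st h]
  | case4 a b rest h ih =>
    intro st
    rw [show pvSweep (a :: b :: rest) = a :: pvSweep (b :: rest) from by simp [pvSweep, h]]
    exact pvALoop_congr a ih st

-- where A's loop succeeds: either everything is consumed, or an adjacent matched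
-- pair occurs in the remaining input, or the head closes the top of the stack
theorem pvPair_exists_aux (t : List Char) : ∀ st,
    (∀ c ∈ t, pvIsBracket c = true) → (∀ c ∈ st, pvOpening.contains c = true) →
    pvALoop t st = true →
    t = [] ∨ (∃ u a b v, t = u ++ a :: b :: v ∧ pvMatch a b = true) ∨
      (∃ top st' b v, st = top :: st' ∧ t = b :: v ∧ pvMatch top b = true) := by
  induction t with
  | nil => intro st _ _ _; exact Or.inl rfl
  | cons c rest ih =>
    intro st hb hst hA
    by_cases hop : pvOpening.contains c = true
    · have hA' : pvALoop rest (c :: st) = true := by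
        rw [pvALoop_cons, if_pos hop] at hA
        exact hA
      have hst' : ∀ x ∈ c :: st, pvOpening.contains x = true := by
        intro x hx
        rcases List.mem_cons.mp hx with rfl | hx
        · exact hop
        · exact hst x hx
      rcases ih (c :: st) (fun x hx => hb x (List.mem_cons_of_mem _ hx)) hst' hA' with h0 | h1 | h2
      · subst h0; simp [pvALoop] at hA'
      · rcases h1 with ⟨u, a, b, v, rfl, hm⟩
        exact Or.inr (Or.inl ⟨c :: u, a, b, v, rfl, hm⟩)
      · rcases h2 with ⟨top, st', b, v, hst2, heq, hm⟩
        injection hst2 with e1 e2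
        refine Or.inr (Or.inl ⟨[], c, b, v, ?_, ?_⟩)
        · simp [heq]
        · rw [e1]; exact hm
    · have hcl : pvClosing.contains c = true := by
        have hbr := hb c List.mem_cons_self
        rw [pvIsBracket_eq] at hbr
        rcases Bool.or_eq_true_iff.mp hbr with h | h
        · exact absurd h hop
        · exact h
      rw [pvALoop_cons, if_neg hop, if_pos hcl] at hA
      cases st with
      | nil => simp at hA
      | cons top st' =>
        change (if pvPairs.get? top ≠ some c then false else pvALoop rest st') = true at hA
        by_cases hg : pvPairs.get? top = some c
        · have hm : pvMatch top c = true := pvPairs_match (hst top List.mem_cons_self) hg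
          exact Or.inr (Or.inr ⟨top, st', c, rest, rfl, rfl, hm⟩)
        · rw [if_pos hg] at hA
          exact absurd hA (by simp)

theorem pvPair_exists (t : List Char)
    (hb : ∀ c ∈ t, pvIsBracket c = true)
    (ht : pvALoop t [] = true) (hne : t ≠ []) :
    ∃ u a b v, t = u ++ a :: b :: v ∧ pvMatch a b = true := by
  rcases pvPair_exists_aux t [] hb (by simp) ht with h0 | h1 | h2
  · exact absurd h0 hne
  · exact h1
  · rcases h2 with ⟨top, st', b, v, hst2, _, _⟩
    exact absurd hst2 (by simp)

theorem pvSweep_shrinks (t : List Char)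
    (h : ∃ u a b v, t = u ++ a :: b :: v ∧ pvMatch a b = true) :
    (pvSweep t).length < t.length := by
  induction t using pvSweep.induct with
  | case1 =>
    rcases h with ⟨u, a, b, v, heq, _⟩
    exact absurd heq (by simp)
  | case2 x =>
    rcases h with ⟨u, a, b, v, heq, _⟩
    have : ([x] : List Char).length = (u ++ a :: b :: v).length := by rw [heq]
    simp at this; omega
  | case3 a b rest hm ih =>
    have hle := pvSweep_length_le rest
    rw [show pvSweep (a :: b :: rest) = pvSweep rest from by simp [pvSweep, hm]]
    simp; omega
  | case4 a b rest hm ih =>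
    rcases h with ⟨u, x, y, v, heq, hxy⟩
    cases u with
    | nil =>
      simp at heq
      obtain ⟨rfl, rfl, rfl⟩ := heq
      exact absurd hxy hm
    | cons a' u' =>
      simp only [List.cons_append] at heq
      injection heq with e1 e2
      rw [show pvSweep (a :: b :: rest) = a :: pvSweep (b :: rest) from by simp [pvSweep, hm]]
      have := ih ⟨u', x, y, v, e2, hxy⟩
      simp at this ⊢; omega

theorem pvSweep_eq_of_length (t : List Char) : (pvSweep t).length = t.length → pvSweep t = t := by
  induction t using pvSweep.induct with
  | case1 => intro _; simp [pvSweep]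
  | case2 a => intro _; simp [pvSweep]
  | case3 a b rest hm ih =>
    intro h
    have hle := pvSweep_length_le rest
    rw [show pvSweep (a :: b :: rest) = pvSweep rest from by simp [pvSweep, hm]] at h
    simp at h; omega
  | case4 a b rest hm ih =>
    intro h
    rw [show pvSweep (a :: b :: rest) = a :: pvSweep (b :: rest) from by simp [pvSweep, hm]] at h ⊢
    simp only [List.length_cons, Nat.add_right_cancel_iff] at h
    rw [ih h]

theorem pvSweep_subset (t : List Char) : ∀ c ∈ pvSweep t, c ∈ t := by
  induction t using pvSweep.induct with
  | case1 => intro c hc; simp [pvSweep] at hc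
  | case2 a => intro c hc; rw [show pvSweep [a] = [a] from by simp [pvSweep]] at hc; exact hc
  | case3 a b rest hm ih =>
    intro c hc
    rw [show pvSweep (a :: b :: rest) = pvSweep rest from by simp [pvSweep, hm]] at hc
    exact List.mem_cons_of_mem _ (List.mem_cons_of_mem _ (ih c hc))
  | case4 a b rest hm ih =>
    intro c hc
    rw [show pvSweep (a :: b :: rest) = a :: pvSweep (b :: rest) from by simp [pvSweep, hm]] at hc
    rcases List.mem_cons.mp hc with rfl | hc
    · exact List.mem_cons_self
    · exact List.mem_cons_of_mem _ (ih c hc)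

theorem pvReduce_spec_aux (n : Nat) : ∀ (t : List Char), t.length ≤ n →
    (∀ c ∈ t, pvIsBracket c = true) → (pvReduce t).isEmpty = pvALoop t [] := by
  induction n with
  | zero =>
    intro t hlen _
    have ht : t = [] := List.eq_nil_of_length_eq_zero (Nat.le_zero.mp hlen)
    subst ht
    rw [pvReduce]
    simp [pvSweep, pvALoop]
  | succ n ihn =>
    intro t hlen hb
    rw [pvReduce]
    simp only [beq_iff_eq]
    by_cases hcond : (pvSweep t).length = t.length
    · have hst : pvSweep t = t := pvSweep_eq_of_length t hcond
      rw [if_pos hcond]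
      cases t with
      | nil => rfl
      | cons c rest =>
        cases hA : pvALoop (c :: rest) [] with
        | false => simp
        | true =>
          exfalso
          have hp := pvPair_exists (c :: rest) hb hA (by simp)
          have := pvSweep_shrinks (c :: rest) hp
          rw [hst] at this
          omega
    · have hlt : (pvSweep t).length < t.length :=
        Nat.lt_of_le_of_ne (pvSweep_length_le t) hcond
      rw [if_neg hcond]
      rw [← pvALoop_sweep t []]
      exact ihn (pvSweep t) (by omega) (fun c hc => hb c (pvSweep_subset t c hc))

theorem pvReduce_spec (t : List Char) (hb : ∀ c ∈ t, pvIsBracket c = true) :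
    (pvReduce t).isEmpty = pvALoop t [] :=
  pvReduce_spec_aux t.length t le_rfl hb

-- ===== VERDICT (by name: the statement is the Claim_ definition above) =====
theorem is_balanced_multiple_spec : Claim_equal_is_balanced_multiple := by
  intro s _
  unfold Spec_is_balanced_multiple is_balanced_multiple is_balanced_multiple_alt
  rw [pvReduce_spec _ (by intro c hc; exact (List.mem_filter.mp hc).2), pvALoop_filter]
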